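-- pv_equiv track=rewrite | github.com/decordoba/mixed-algorithms | splitStringByDictionary.py | calculate_dictionary_permutations
-- ===== SOURCE A (Python) =====
-- def calculate_dictionary_permutations(s, d):
--     """
--     From a sentence s with only lowercase letters (no spaces), and a dictionary
--     d with all words known, it returns a list of permutations, where every
--     permutation has three fields: the first one is a list of words that make a
--     sentence, the second one is the cost of the first N-1 words (where N is the
--     number of words in the list of words), and the third one is the cost of the
--     last word. The cost refers to the number of characters in words that are not
--     found in the dictionary.
--     """
--
--     # For only one character, return it as the final word, and calculate cost
--     if len(s) == 1:
--         return [([s], 0, 0 if s in d else 1)]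
--
--     # Calculate permutation for all s but last letter
--     last = s[-1]
--     permutations = calculate_dictionary_permutations(s[:-1], d)
--
--     # Add last letter to all permutations and calculate new costs
--     # Note that we only record new sentences if their costs are lower than the old ones
--     costs = {}
--     my_permutations = []
--     for p in permutations:
--         prefix, cost_first, cost_last = p
--
--         # Add last letter as separate word after the sentence
--         new_cost_first = cost_first + cost_last
--         if last not in costs or new_cost_first < costs[last]:
--             new_prefix1 = prefix + [last]
--             my_permutations.append([new_prefix1, new_cost_first, 0 if last in d else 1])
--             costs[last] = new_cost_first
--
--         # Add last letter as letter at the end of last word in sentence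
--         new_last = prefix[-1] + last
--         if new_last not in costs or cost_first < costs[new_last]:
--             new_prefix2 = prefix[:]
--             new_prefix2[-1] = new_last
--             my_permutations.append([new_prefix2, cost_first, 0 if new_last in d else len(new_last)])
--             costs[new_last] = cost_first
--
--     # Delete permutations with cost higher than the one recorded in costs
--     i = 0
--     while i < len(my_permutations):
--         prefix, cost_first, cost_last = my_permutations[i]
--         if cost_first > costs[prefix[-1]]:
--             del my_permutations[i]
--         else:
--             i += 1
--
--     # Return permutations obtained
--     return my_permutations
-- ===== SOURCE B (Python) =====
-- def calculate_dictionary_permutations(s, d):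
--     """Bottom-up version: one loop over the characters of s instead of
--     top-down recursion, and a filter pass instead of in-place deletion."""
--     first = s[0]
--     permutations = [([first], 0, 0 if first in d else 1)]
--     for last in s[1:]:
--         costs = {}
--         fresh = []
--         for prefix, cost_first, cost_last in permutations:
--             # variant 1: start a new one-letter word
--             new_cost_first = cost_first + cost_last
--             if last not in costs or new_cost_first < costs[last]:
--                 fresh.append([prefix + [last], new_cost_first,
--                               0 if last in d else 1])
--                 costs[last] = new_cost_first
--             # variant 2: glue the letter onto the last word
--             new_last = prefix[-1] + last
--             if new_last not in costs or cost_first < costs[new_last]: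
--                 glued = prefix[:-1]
--                 glued.append(new_last)
--                 fresh.append([glued, cost_first,
--                               0 if new_last in d else len(new_last)])
--                 costs[new_last] = cost_first
--         permutations = [p for p in fresh if p[1] <= costs[p[0][-1]]]
--     return permutations
-- ===== Notes on version B (the rewrite author's own statement) =====
-- stated objective: alternative
-- what changed: Replaces the top-down recursion on s[:-1] with a single bottom-up loop over the characters of s, and replaces the in-place while/del deletion pass by a filter comprehension per level.
import Mathlib
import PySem

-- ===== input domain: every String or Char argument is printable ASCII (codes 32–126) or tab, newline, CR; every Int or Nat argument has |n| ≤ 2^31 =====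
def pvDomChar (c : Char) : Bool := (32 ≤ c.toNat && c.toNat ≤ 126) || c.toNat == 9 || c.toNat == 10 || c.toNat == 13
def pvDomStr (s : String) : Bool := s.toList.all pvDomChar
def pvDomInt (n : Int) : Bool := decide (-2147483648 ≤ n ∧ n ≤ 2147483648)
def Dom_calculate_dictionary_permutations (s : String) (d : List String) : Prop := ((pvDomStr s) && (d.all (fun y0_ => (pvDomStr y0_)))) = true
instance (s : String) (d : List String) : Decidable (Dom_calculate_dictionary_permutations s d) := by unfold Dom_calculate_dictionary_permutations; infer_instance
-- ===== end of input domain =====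

-- B replaces A's top-down recursion + in-place while/del deletion by a single bottom-up
-- loop over the characters with a filter pass per level (objective: alternative decomposition).

-- ===== PORT A =====

-- 'k not in costs or v < costs[k]'
def pvA_better (costs : PySem.Dict String Int) (k : String) (v : Int) : Bool :=
  match PySem.Dict.get? costs k with
  | none => true
  | some c => decide (v < c)

-- the body of A's 'for p in permutations' loop, as a fold step over (costs, my_permutations)
def pvA_build (d : List String) (last : String)
    (st : PySem.Dict String Int × List (List String × Int × Int))
    (p : List String × Int × Int) :
    PySem.Dict String Int × List (List String × Int × Int) :=
  let new_cost_first := p.2.1 + p.2.2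
  let st1 :=
    if pvA_better st.1 last new_cost_first then
      (PySem.Dict.insert st.1 last new_cost_first,
       st.2 ++ [(p.1 ++ [last], new_cost_first, if last ∈ d then (0 : Int) else 1)])
    else st
  let new_last := (PySem.List.pyGetD p.1 (-1) "") ++ last
  if pvA_better st1.1 new_last p.2.1 then
    (PySem.Dict.insert st1.1 new_last p.2.1,
     st1.2 ++ [(p.1.dropLast ++ [new_last], p.2.1,
                if new_last ∈ d then (0 : Int) else PySem.Str.len new_last)])
  else st1

-- A's 'while i < len(my_permutations): … del …' pass (the condition depends only on the
-- element and on the finished costs dict, so the in-place deletion is this recursion)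
def pvA_delete (costs : PySem.Dict String Int) :
    List (List String × Int × Int) → List (List String × Int × Int)
  | [] => []
  | p :: rest =>
      if PySem.Dict.getD costs (PySem.List.pyGetD p.1 (-1) "") 0 < p.2.1 then
        pvA_delete costs rest
      else
        p :: pvA_delete costs rest

-- one recursion level of A after the recursive call returned 'permutations'
def pvA_level (d : List String) (last : String)
    (perms : List (List String × Int × Int)) : List (List String × Int × Int) :=
  let st := perms.foldl (pvA_build d last) (PySem.Dict.empty, [])
  pvA_delete st.1 st.2

-- A's recursion on s[:-1]
def pvA_go (d : List String) (cs : List Char) : List (List String × Int × Int) :=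
  if _h : cs.length ≤ 1 then
    [([String.ofList cs], 0, if String.ofList cs ∈ d then (0 : Int) else 1)]
  else
    pvA_level d (String.ofList [(cs.getLast?).getD ' ']) (pvA_go d cs.dropLast)
termination_by cs.length
decreasing_by
  have : cs ≠ [] := by intro hc; subst hc; simp at _h
  simp [List.length_dropLast]
  omega

def calculate_dictionary_permutations (s : String) (d : List String) :
    List (List String × Int × Int) :=
  pvA_go d s.toList

-- ===== PORT B =====

def pvB_unit (d : List String) (w : String) : Int := if w ∈ d then 0 else 1

def pvB_word (d : List String) (w : String) : Int := if w ∈ d then 0 else PySem.Str.len w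

-- 'k not in costs or v < costs[k]', via contains/getD as Source B reads it
def pvB_fresh (costs : PySem.Dict String Int) (k : String) (v : Int) : Bool :=
  !(PySem.Dict.contains costs k) || decide (v < PySem.Dict.getD costs k 0)

-- Source B's inner for-loop body over (costs, fresh)
def pvB_step (d : List String) (last : String)
    (acc : PySem.Dict String Int × List (List String × Int × Int))
    (p : List String × Int × Int) :
    PySem.Dict String Int × List (List String × Int × Int) :=
  match p with
  | (pre, cf, cl) =>
    let acc1 :=
      if pvB_fresh acc.1 last (cf + cl) then
        (PySem.Dict.insert acc.1 last (cf + cl),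
         acc.2 ++ [(pre ++ [last], cf + cl, pvB_unit d last)])
      else acc
    let glued := (PySem.List.pyGetD pre (-1) "") ++ last
    if pvB_fresh acc1.1 glued cf then
      (PySem.Dict.insert acc1.1 glued cf,
       acc1.2 ++ [(pre.dropLast ++ [glued], cf, pvB_word d glued)])
    else acc1

-- one iteration of Source B's outer loop: rebuild, then keep the cheap ones by a filter
def pvB_level (d : List String) (last : String)
    (perms : List (List String × Int × Int)) : List (List String × Int × Int) :=
  let r := perms.foldl (pvB_step d last) (PySem.Dict.empty, [])
  r.2.filter (fun p => decide (p.2.1 ≤ PySem.Dict.getD r.1 (PySem.List.pyGetD p.1 (-1) "") 0))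

def calculate_dictionary_permutations_alt (s : String) (d : List String) :
    List (List String × Int × Int) :=
  let cs := s.toList
  let w0 := String.ofList (cs.take 1)
  (cs.drop 1).foldl (fun perms c => pvB_level d (String.ofList [c]) perms)
    [([w0], 0, pvB_unit d w0)]

-- ===== PRECONDITION & SPEC =====
-- Pre_ excludes only the empty string, on which both Pythons raise IndexError (s[-1] / s[0]).
def Pre_calculate_dictionary_permutations (s : String) (d : List String) : Prop := s ≠ ""
instance (s : String) (d : List String) : Decidable (Pre_calculate_dictionary_permutations s d) := by
  unfold Pre_calculate_dictionary_permutations; infer_instance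

def pvWitness_calculate_dictionary_permutations : String × List String := ("abc", ["ab", "c"])

def Spec_calculate_dictionary_permutations (s : String) (d : List String) (out : List (List String × Int × Int)) : Prop := out = calculate_dictionary_permutations_alt s d
instance (s : String) (d : List String) (out : List (List String × Int × Int)) : Decidable (Spec_calculate_dictionary_permutations s d out) := by unfold Spec_calculate_dictionary_permutations; infer_instance

-- ===== CLAIM (what is proved, stated in full; the proofs are below) =====
def Claim_equal_calculate_dictionary_permutations : Prop := ∀ (s : String) (d : List String), Dom_calculate_dictionary_permutations s d → Pre_calculate_dictionary_permutations s d → Spec_calculate_dictionary_permutations s d (calculate_dictionary_permutations s d)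

-- ===== LEMMAS AND PROOFS =====

theorem pv_fresh_eq_better (costs : PySem.Dict String Int) (k : String) (v : Int) :
    pvB_fresh costs k v = pvA_better costs k v := by
  unfold pvB_fresh pvA_better
  rw [PySem.Dict.contains_eq_isSome_get?, PySem.Dict.getD_eq_get?_getD]
  cases PySem.Dict.get? costs k <;> simp

theorem pv_step_eq_build (d : List String) (last : String)
    (acc : PySem.Dict String Int × List (List String × Int × Int))
    (p : List String × Int × Int) :
    pvB_step d last acc p = pvA_build d last acc p := by
  obtain ⟨pre, cf, cl⟩ := p
  simp only [pvB_step, pvA_build, pvB_unit, pvB_word, pv_fresh_eq_better]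

theorem pv_delete_eq_filter (costs : PySem.Dict String Int)
    (l : List (List String × Int × Int)) :
    pvA_delete costs l
      = l.filter (fun p => decide (p.2.1 ≤ PySem.Dict.getD costs (PySem.List.pyGetD p.1 (-1) "") 0)) := by
  induction l with
  | nil => simp [pvA_delete]
  | cons p rest ih =>
      simp only [pvA_delete, List.filter_cons, ih]
      by_cases h : PySem.Dict.getD costs (PySem.List.pyGetD p.1 (-1) "") 0 < p.2.1
      · simp [h, not_le.mpr h]
      · simp [h, not_lt.mp h]

theorem pv_level_eq (d : List String) (last : String)
    (perms : List (List String × Int × Int)) :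
    pvB_level d last perms = pvA_level d last perms := by
  have hs : pvB_step d last = pvA_build d last := by
    funext acc p; exact pv_step_eq_build d last acc p
  unfold pvB_level pvA_level
  rw [hs, pv_delete_eq_filter]

-- B's loop, phrased on the character list (definitionally what the alt port computes)
def pvB_core (d : List String) (cs : List Char) : List (List String × Int × Int) :=
  (cs.drop 1).foldl (fun perms c => pvB_level d (String.ofList [c]) perms)
    [([String.ofList (cs.take 1)], 0, pvB_unit d (String.ofList (cs.take 1)))]

theorem pv_main (d : List String) (cs : List Char) (h : cs ≠ []) :
    pvA_go d cs = pvB_core d cs := by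
  induction cs using List.reverseRecOn with
  | nil => exact absurd rfl h
  | append_singleton l x ih =>
      by_cases hl : l = []
      · subst hl
        rw [pvA_go]
        simp [pvB_core, pvB_unit]
      · have hlen : ¬ (l ++ [x]).length ≤ 1 := by
          have : l.length ≠ 0 := by simpa [List.length_eq_zero_iff] using hl
          simp; omega
        rw [pvA_go, dif_neg hlen]
        simp only [List.dropLast_concat, List.getLast?_concat, Option.getD_some]
        rw [ih hl, ← pv_level_eq]
        have h1 : 1 ≤ l.length := by
          have : l.length ≠ 0 := by simpa [List.length_eq_zero_iff] using hl
          omega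
        unfold pvB_core
        rw [List.take_append_of_le_length h1, List.drop_append_of_le_length h1,
          List.foldl_append]
        simp

-- ===== VERDICT (by name: the statement is the Claim_ definition above) =====
theorem calculate_dictionary_permutations_spec : Claim_equal_calculate_dictionary_permutations := by
  intro s d _hdom hpre
  unfold Spec_calculate_dictionary_permutations
  show pvA_go d s.toList = calculate_dictionary_permutations_alt s d
  have : calculate_dictionary_permutations_alt s d = pvB_core d s.toList := rfl
  rw [this]
  apply pv_main
  intro hnil
  exact hpre (by simpa [String.toList_eq_nil_iff] using hnil)
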